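-- pv_equiv track=rewrite | github.com/windshadow233/Riichi-Calculator | mahjong/utils.py | to_pattern
-- ===== SOURCE A (Python) =====
-- from collections import Counter
--
-- class AutoCleanCounter(Counter):
--     def __setitem__(self, key, value):
--         if value == 0:
--             del self[key]
--         else:
--             super(AutoCleanCounter, self).__setitem__(key, value)
--
-- def to_pattern(counter: AutoCleanCounter):
--     counter = list(sorted(counter.items(), key=lambda x: x[0]))
--     pattern = []
--     current_digit, current_type = None, None
--     new = []
--     for tile, c in counter:
--         digit, t = tile % 10, tile // 10
--         if t != current_type or digit - 2 > current_digit or t == 4: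
--             if new:
--                 pattern.append(new)
--                 new = []
--         if t == current_type and t != 4 and digit - 2 == current_digit:
--             new.extend([0, c])
--         else:
--             new.append(c)
--         current_digit, current_type = digit, t
--     if new:
--         pattern.append(new)
--     return pattern
-- ===== SOURCE B (Python) =====
-- def to_pattern(counter):
--     # Divide and conquer: whether two tiles belong to the same group depends
--     # only on that adjacent pair, so the patterns of the two sorted halves
--     # merge with at most one join at the boundary.
--     return _dc(sorted(counter.items(), key=lambda kv: kv[0]))
--
-- def _dc(items):
--     n = len(items)
--     if n == 0:
--         return []
--     if n == 1:
--         return [[items[0][1]]]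
--     mid = n // 2
--     left, right = _dc(items[:mid]), _dc(items[mid:])
--     p, q = items[mid - 1][0], items[mid][0]
--     if q // 10 == p // 10 and p // 10 != 4 and q % 10 - p % 10 <= 2:
--         fill = [0] if q % 10 - p % 10 == 2 else []
--         return left[:-1] + [left[-1] + fill + right[0]] + right[1:]
--     return left + right
-- ===== Notes on version B (the rewrite author's own statement) =====
-- stated objective: alternative
-- what changed: Replaces A's single stateful left-to-right scan (flush flags, current_digit/current_type sentinels, pending run buffer) with a divide-and-conquer recursion: the sorted items are split in half, each half's pattern is computed recursively, and the two patterns are merged by joining at most the boundary groups, which is correct because group membership depends only on adjacent tile pairs.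
import Mathlib
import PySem

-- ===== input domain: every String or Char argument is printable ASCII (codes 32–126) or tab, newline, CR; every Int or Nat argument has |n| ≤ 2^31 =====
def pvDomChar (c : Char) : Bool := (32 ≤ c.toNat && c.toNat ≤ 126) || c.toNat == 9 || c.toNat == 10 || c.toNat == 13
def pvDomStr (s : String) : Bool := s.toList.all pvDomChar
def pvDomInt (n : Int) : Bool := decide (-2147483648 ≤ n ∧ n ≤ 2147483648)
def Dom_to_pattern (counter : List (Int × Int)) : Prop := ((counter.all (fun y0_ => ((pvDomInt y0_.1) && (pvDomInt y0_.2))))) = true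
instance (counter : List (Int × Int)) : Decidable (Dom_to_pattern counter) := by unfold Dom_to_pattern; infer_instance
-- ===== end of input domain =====

-- B replaces A's single stateful scan by a divide-and-conquer recursion that
-- computes each half's pattern and merges at the boundary (objective:
-- alternative algorithm, same cost).

-- ===== PORT A =====
-- the for-loop of A: state = (pattern, current (digit, type) or None, new)
def toPatternGo : List (Int × Int) → List (List Int) → Option (Int × Int) → List Int → List (List Int)
  | [], pattern, _, new =>
    -- if new: pattern.append(new)
    if new = [] then pattern else pattern ++ [new]
  | (tile, c) :: rest, pattern, cur, new =>
    let digit := PySem.Int.mod tile 10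
    let t := PySem.Int.floordiv tile 10
    -- if t != current_type or digit - 2 > current_digit or t == 4  (short-circuit: None only meets the first test)
    let flush : Bool := match cur with
      | none => true
      | some (cd, ct) => decide (t ≠ ct) || decide (digit - 2 > cd) || decide (t = 4)
    -- if t == current_type and t != 4 and digit - 2 == current_digit
    let ext : Bool := match cur with
      | none => false
      | some (cd, ct) => decide (t = ct) && decide (t ≠ 4) && decide (digit - 2 = cd)
    let pattern1 := if flush then (if new = [] then pattern else pattern ++ [new]) else pattern
    let new1 := if flush then (if new = [] then new else []) else new
    let new2 := if ext then new1 ++ [0, c] else new1 ++ [c]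
    toPatternGo rest pattern1 (some (digit, t)) new2

def to_pattern (counter : List (Int × Int)) : List (List Int) :=
  toPatternGo (PySem.List.sorted counter (fun kv => kv.1) false) [] none []

-- ===== PORT B =====
-- the boundary join of Source B: p, q are the tiles on either side of the split
def mergeHalves (left right : List (List Int)) (p q : Int) : List (List Int) :=
  if PySem.Int.floordiv q 10 = PySem.Int.floordiv p 10 ∧ PySem.Int.floordiv p 10 ≠ 4 ∧
      PySem.Int.mod q 10 - PySem.Int.mod p 10 ≤ 2 then
    let fill : List Int := if PySem.Int.mod q 10 - PySem.Int.mod p 10 = 2 then [0] else []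
    -- left[:-1] + [left[-1] + fill + right[0]] + right[1:]
    match left.getLast?, right with
    | some lg, rh :: rt => left.dropLast ++ [lg ++ fill ++ rh] ++ rt
    | _, _ => left ++ right   -- not reached: both halves are patterns of nonempty lists
  else left ++ right

-- termination helpers for dcPattern (cited by its decreasing_by)
lemma slice_take_len_lt {α : Type} (items : List α) (h : 2 ≤ items.length) :
    (PySem.List.slice items none (some (PySem.Int.floordiv (items.length : Int) 2))).length
      < items.length := by
  have hm : PySem.Int.floordiv (items.length : Int) 2 = ((items.length / 2 : Nat) : Int) := by
    exact_mod_cast PySem.Int.floordiv_natCast items.length 2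
  rw [hm, PySem.List.slice_to_natCast, List.length_take]
  omega

lemma slice_drop_len_lt {α : Type} (items : List α) (h : 2 ≤ items.length) :
    (PySem.List.slice items (some (PySem.Int.floordiv (items.length : Int) 2)) none).length
      < items.length := by
  have hm : PySem.Int.floordiv (items.length : Int) 2 = ((items.length / 2 : Nat) : Int) := by
    exact_mod_cast PySem.Int.floordiv_natCast items.length 2
  rw [hm, PySem.List.slice_from_natCast, List.length_drop]
  omega

-- the recursion _dc of Source B
def dcPattern : List (Int × Int) → List (List Int)
  | [] => []
  | [x] => [[x.2]]
  | x :: y :: rest =>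
    let items := x :: y :: rest
    let mid : Int := PySem.Int.floordiv (items.length : Int) 2
    let left := dcPattern (PySem.List.slice items none (some mid))
    let right := dcPattern (PySem.List.slice items (some mid) none)
    match PySem.List.pyGet? items (mid - 1), PySem.List.pyGet? items mid with
    | some pp, some qq => mergeHalves left right pp.1 qq.1
    | _, _ => left ++ right   -- not reached: 0 < mid < len(items)
termination_by xs => xs.length
decreasing_by
  · exact slice_take_len_lt (x :: y :: rest) (by simp)
  · exact slice_drop_len_lt (x :: y :: rest) (by simp)

def to_pattern_alt (counter : List (Int × Int)) : List (List Int) :=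
  dcPattern (PySem.List.sorted counter (fun kv => kv.1) false)

-- ===== PRECONDITION & SPEC =====
def Spec_to_pattern (counter : List (Int × Int)) (out : List (List Int)) : Prop := out = to_pattern_alt counter
instance (counter : List (Int × Int)) (out : List (List Int)) : Decidable (Spec_to_pattern counter out) := by unfold Spec_to_pattern; infer_instance

-- ===== CLAIM (what is proved, stated in full; the proofs are below) =====
def Claim_equal_to_pattern : Prop := ∀ (counter : List (Int × Int)), Dom_to_pattern counter → Spec_to_pattern counter (to_pattern counter)

-- ===== LEMMAS AND PROOFS =====

-- 'a tile q with suit/digit of the previous tile (d, t) continues the group'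
abbrev joins (d t q : Int) : Prop :=
  PySem.Int.floordiv q 10 = t ∧ t ≠ 4 ∧ PySem.Int.mod q 10 - d ≤ 2

def gfill (d q : Int) : List Int :=
  if PySem.Int.mod q 10 - d = 2 then [0] else []

-- reference: the grouping as a right recursion exposing the head group
def gspec : List (Int × Int) → List (List Int)
  | [] => []
  | [x] => [[x.2]]
  | x :: y :: rest =>
    match gspec (y :: rest) with
    | h :: gs =>
      if joins (PySem.Int.mod x.1 10) (PySem.Int.floordiv x.1 10) y.1 then
        (x.2 :: gfill (PySem.Int.mod x.1 10) y.1 ++ h) :: gs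
      else
        [x.2] :: h :: gs
    | [] => [[x.2]]   -- unreachable

lemma gspec_ne_nil (x : Int × Int) (xs : List (Int × Int)) : gspec (x :: xs) ≠ [] := by
  cases xs with
  | nil => simp [gspec]
  | cons y rest =>
    rw [gspec.eq_def]
    rcases hg : gspec (y :: rest) with _ | ⟨h, gs⟩
    · simp [hg]
    · simp only [hg]
      split <;> simp

lemma gspec_cons_cons (x y : Int × Int) (rest : List (Int × Int))
    (h : List Int) (gs : List (List Int)) (hg : gspec (y :: rest) = h :: gs) :
    gspec (x :: y :: rest) =
      if joins (PySem.Int.mod x.1 10) (PySem.Int.floordiv x.1 10) y.1 then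
        (x.2 :: gfill (PySem.Int.mod x.1 10) y.1 ++ h) :: gs
      else
        [x.2] :: h :: gs := by
  rw [gspec.eq_def]
  simp only [hg]

-- A's pending run glued onto the grouping of the remaining items
def glue (d t : Int) (run : List Int) : List (Int × Int) → List (List Int)
  | [] => [run]
  | y :: rest =>
    match gspec (y :: rest) with
    | h :: gs =>
      if joins d t y.1 then (run ++ gfill d y.1 ++ h) :: gs
      else run :: h :: gs
    | [] => [run]   -- unreachable

lemma glue_eq_cons (d t : Int) (run : List Int) (y : Int × Int) (rest : List (Int × Int))
    (h : List Int) (gs : List (List Int)) (hg : gspec (y :: rest) = h :: gs) :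
    glue d t run (y :: rest) =
      if joins d t y.1 then (run ++ gfill d y.1 ++ h) :: gs else run :: h :: gs := by
  rw [glue]
  simp only [hg]

lemma gspec_eq_glue (tile c : Int) (rest : List (Int × Int)) :
    gspec ((tile, c) :: rest) =
      glue (PySem.Int.mod tile 10) (PySem.Int.floordiv tile 10) [c] rest := by
  cases rest with
  | nil => simp [gspec, glue]
  | cons y rest' =>
    rcases hg : gspec (y :: rest') with _ | ⟨h, gs⟩
    · exact absurd hg (gspec_ne_nil y rest')
    · rw [gspec_cons_cons _ _ _ _ _ hg, glue_eq_cons _ _ _ _ _ _ _ hg]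
      split <;> simp

lemma glue_prepend (d t : Int) (run s : List Int) (rest : List (Int × Int))
    (h : List Int) (gs : List (List Int)) (hg : glue d t s rest = h :: gs) :
    glue d t (run ++ s) rest = (run ++ h) :: gs := by
  cases rest with
  | nil =>
    simp only [glue] at hg ⊢
    injection hg with h1 h2
    subst h1; subst h2
    rfl
  | cons y rest' =>
    rcases hgs : gspec (y :: rest') with _ | ⟨hh, hgs'⟩
    · exact absurd hgs (gspec_ne_nil y rest')
    · rw [glue_eq_cons _ _ _ _ _ _ _ hgs] at hg
      rw [glue_eq_cons _ _ _ _ _ _ _ hgs]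
      by_cases hj : joins d t y.1
      · rw [if_pos hj] at hg ⊢
        injection hg with h1 h2
        subst h1; subst h2
        simp
      · rw [if_neg hj] at hg ⊢
        injection hg with h1 h2
        subst h1; subst h2
        rfl

-- the two shapes of glue on a cons, resolved by whether the tile joins
lemma glue_cons_pos (d t : Int) (run : List Int) (tile c : Int) (rest : List (Int × Int))
    (hj : joins d t tile) (h : List Int) (gs : List (List Int))
    (hglue : glue (PySem.Int.mod tile 10) (PySem.Int.floordiv tile 10) [c] rest = h :: gs) :
    glue d t run ((tile, c) :: rest) = (run ++ gfill d tile ++ h) :: gs := by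
  have hgs : gspec ((tile, c) :: rest) = h :: gs := by rw [gspec_eq_glue]; exact hglue
  rw [glue_eq_cons d t run (tile, c) rest h gs hgs]
  exact if_pos hj

lemma glue_cons_neg (d t : Int) (run : List Int) (tile c : Int) (rest : List (Int × Int))
    (hj : ¬ joins d t tile) (h : List Int) (gs : List (List Int))
    (hglue : glue (PySem.Int.mod tile 10) (PySem.Int.floordiv tile 10) [c] rest = h :: gs) :
    glue d t run ((tile, c) :: rest) = run :: h :: gs := by
  have hgs : gspec ((tile, c) :: rest) = h :: gs := by rw [gspec_eq_glue]; exact hglue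
  rw [glue_eq_cons d t run (tile, c) rest h gs hgs]
  exact if_neg hj

-- A's loop, once a run is pending, computes glue of the remaining items
lemma go_glue : ∀ (items : List (Int × Int)) (pat : List (List Int)) (d t : Int) (run : List Int),
    run ≠ [] → toPatternGo items pat (some (d, t)) run = pat ++ glue d t run items := by
  intro items
  induction items with
  | nil =>
    intro pat d t run hrun
    simp [toPatternGo, glue, hrun]
  | cons x rest ih =>
    intro pat d t run hrun
    obtain ⟨tile, c⟩ := x
    rcases hgs : gspec ((tile, c) :: rest) with _ | ⟨h, gs⟩
    · exact absurd hgs (gspec_ne_nil (tile, c) rest)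
    have hglue : glue (PySem.Int.mod tile 10) (PySem.Int.floordiv tile 10) [c] rest = h :: gs := by
      rw [← gspec_eq_glue, hgs]
    simp only [toPatternGo]
    by_cases hj : joins d t tile
    · obtain ⟨hteq, ht4, hgap⟩ := id hj
      have hflush : (decide (PySem.Int.floordiv tile 10 ≠ t) ||
          decide (PySem.Int.mod tile 10 - 2 > d) ||
          decide (PySem.Int.floordiv tile 10 = 4)) = false := by
        simp only [Bool.or_eq_false_iff, decide_eq_false_iff_not, not_lt, not_not]
        exact ⟨⟨hteq, by omega⟩, by omega⟩
      rw [glue_cons_pos d t run tile c rest hj h gs hglue]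
      by_cases h2 : PySem.Int.mod tile 10 - d = 2
      · have hext : (decide (PySem.Int.floordiv tile 10 = t) &&
            decide (PySem.Int.floordiv tile 10 ≠ 4) &&
            decide (PySem.Int.mod tile 10 - 2 = d)) = true := by
          simp only [Bool.and_eq_true, decide_eq_true_eq]
          exact ⟨⟨hteq, by omega⟩, by omega⟩
        simp only [hflush, hext, Bool.false_eq_true, if_false, if_true]
        rw [ih pat (PySem.Int.mod tile 10) (PySem.Int.floordiv tile 10) (run ++ [0, c]) (by simp)]
        have hsp : run ++ [0, c] = (run ++ [0]) ++ [c] := by simp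
        rw [hsp, glue_prepend (PySem.Int.mod tile 10) (PySem.Int.floordiv tile 10)
          (run ++ [0]) [c] rest h gs hglue]
        simp only [gfill]
        rw [if_pos h2]
      · have hext : (decide (PySem.Int.floordiv tile 10 = t) &&
            decide (PySem.Int.floordiv tile 10 ≠ 4) &&
            decide (PySem.Int.mod tile 10 - 2 = d)) = false := by
          simp only [Bool.and_eq_false_iff, decide_eq_false_iff_not]
          right; omega
        simp only [hflush, hext, Bool.false_eq_true, if_false]
        rw [ih pat (PySem.Int.mod tile 10) (PySem.Int.floordiv tile 10) (run ++ [c]) (by simp)]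
        rw [glue_prepend (PySem.Int.mod tile 10) (PySem.Int.floordiv tile 10)
          run [c] rest h gs hglue]
        simp only [gfill]
        rw [if_neg h2]
        simp
    · have hj' : ¬(PySem.Int.floordiv tile 10 = t ∧ t ≠ 4 ∧ PySem.Int.mod tile 10 - d ≤ 2) := hj
      have hflush : (decide (PySem.Int.floordiv tile 10 ≠ t) ||
          decide (PySem.Int.mod tile 10 - 2 > d) ||
          decide (PySem.Int.floordiv tile 10 = 4)) = true := by
        simp only [Bool.or_eq_true, decide_eq_true_eq]
        omega
      have hext : (decide (PySem.Int.floordiv tile 10 = t) &&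
          decide (PySem.Int.floordiv tile 10 ≠ 4) &&
          decide (PySem.Int.mod tile 10 - 2 = d)) = false := by
        simp only [Bool.and_eq_false_iff, decide_eq_false_iff_not]
        omega
      simp only [hflush, hext, Bool.false_eq_true, if_false, if_true, if_neg hrun,
        List.nil_append]
      rw [ih (pat ++ [run]) (PySem.Int.mod tile 10) (PySem.Int.floordiv tile 10) [c] (by simp)]
      rw [hglue]
      rw [glue_cons_neg d t run tile c rest hj h gs hglue]
      simp

lemma to_pattern_eq_gspec (counter : List (Int × Int)) :
    to_pattern counter = gspec (PySem.List.sorted counter (fun kv => kv.1) false) := by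
  unfold to_pattern
  rcases hs : PySem.List.sorted counter (fun kv => kv.1) false with _ | ⟨⟨tile, c⟩, rest⟩
  · rfl
  · have hstep : toPatternGo ((tile, c) :: rest) [] none [] =
        toPatternGo rest [] (some (PySem.Int.mod tile 10, PySem.Int.floordiv tile 10)) [c] := by
      simp [toPatternGo]
    rw [hstep, go_glue rest [] (PySem.Int.mod tile 10) (PySem.Int.floordiv tile 10) [c] (by simp)]
    rw [← gspec_eq_glue]
    simp

-- B's merge, unfolded for nonempty arguments
lemma mergeHalves_eq_ite (l : List Int) (L : List (List Int)) (r : List Int)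
    (R : List (List Int)) (p q : Int) :
    mergeHalves (l :: L) (r :: R) p q =
      if joins (PySem.Int.mod p 10) (PySem.Int.floordiv p 10) q then
        (l :: L).dropLast ++ [(l :: L).getLast (by simp) ++ gfill (PySem.Int.mod p 10) q ++ r] ++ R
      else (l :: L) ++ (r :: R) := by
  by_cases hj : joins (PySem.Int.mod p 10) (PySem.Int.floordiv p 10) q
  · have hj' := hj
    unfold joins at hj'
    rw [mergeHalves, if_pos hj', if_pos hj]
    rw [List.getLast?_eq_some_getLast (l := l :: L) (by simp)]
    unfold gfill
    rfl
  · have hj' := hj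
    unfold joins at hj'
    rw [mergeHalves, if_neg hj', if_neg hj]

lemma mergeHalves_cons_left (a : List Int) (L R : List (List Int)) (p q : Int)
    (hL : L ≠ []) (hR : R ≠ []) :
    mergeHalves (a :: L) R p q = a :: mergeHalves L R p q := by
  rcases L with _ | ⟨l0, L'⟩
  · exact absurd rfl hL
  rcases R with _ | ⟨r0, R'⟩
  · exact absurd rfl hR
  rw [mergeHalves_eq_ite, mergeHalves_eq_ite]
  by_cases hj : joins (PySem.Int.mod p 10) (PySem.Int.floordiv p 10) q
  · rw [if_pos hj, if_pos hj]
    rw [List.dropLast_cons₂]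
    rw [List.getLast_cons (List.cons_ne_nil l0 L')]
    simp
  · rw [if_neg hj, if_neg hj]
    rfl

lemma mergeHalves_prepend_head (u hd : List Int) (gsL R : List (List Int)) (p q : Int)
    (hR : R ≠ []) (M1 : List Int) (Ms : List (List Int))
    (hM : mergeHalves (hd :: gsL) R p q = M1 :: Ms) :
    mergeHalves ((u ++ hd) :: gsL) R p q = (u ++ M1) :: Ms := by
  rcases R with _ | ⟨r0, R'⟩
  · exact absurd rfl hR
  rcases gsL with _ | ⟨g0, gsL'⟩
  · rw [mergeHalves_eq_ite] at hM
    rw [mergeHalves_eq_ite]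
    by_cases hj : joins (PySem.Int.mod p 10) (PySem.Int.floordiv p 10) q
    · rw [if_pos hj] at hM
      rw [if_pos hj]
      simp only [List.dropLast_singleton, List.getLast_singleton, List.nil_append,
        List.cons_append] at hM ⊢
      injection hM with e1 e2
      subst e1; subst e2
      simp
    · rw [if_neg hj] at hM
      rw [if_neg hj]
      simp only [List.cons_append] at hM ⊢
      injection hM with e1 e2
      subst e1; subst e2
      rfl
  · rw [mergeHalves_eq_ite] at hM
    rw [mergeHalves_eq_ite]
    by_cases hj : joins (PySem.Int.mod p 10) (PySem.Int.floordiv p 10) q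
    · rw [if_pos hj] at hM
      rw [if_pos hj]
      rw [List.dropLast_cons₂, List.getLast_cons (List.cons_ne_nil g0 gsL')] at hM
      rw [List.dropLast_cons₂, List.getLast_cons (List.cons_ne_nil g0 gsL')]
      simp only [List.cons_append] at hM ⊢
      injection hM with e1 e2
      subst e1; subst e2
      rfl
    · rw [if_neg hj] at hM
      rw [if_neg hj]
      simp only [List.cons_append] at hM ⊢
      injection hM with e1 e2
      subst e1; subst e2
      rfl

lemma gspec_append : ∀ (xs ys : List (Int × Int)) (hx : xs ≠ []) (hy : ys ≠ []),
    gspec (xs ++ ys) = mergeHalves (gspec xs) (gspec ys) (xs.getLast hx).1 (ys.head hy).1 := by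
  intro xs
  induction xs with
  | nil => intro ys hx hy; exact absurd rfl hx
  | cons x xs' ih =>
    intro ys hx hy
    rcases ys with _ | ⟨z, ys'⟩
    · exact absurd rfl hy
    rcases hGR : gspec (z :: ys') with _ | ⟨hR, gsR⟩
    · exact absurd hGR (gspec_ne_nil z ys')
    cases xs' with
    | nil =>
      simp only [List.cons_append, List.nil_append, List.head_cons]
      rw [gspec_cons_cons x z ys' hR gsR hGR]
      have hgx : gspec [x] = [[x.2]] := rfl
      rw [hgx]
      have hlx : ([x].getLast hx) = x := List.getLast_singleton hx
      rw [hlx, mergeHalves_eq_ite]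
      by_cases hj : joins (PySem.Int.mod x.1 10) (PySem.Int.floordiv x.1 10) z.1
      · rw [if_pos hj, if_pos hj]
        simp
      · rw [if_neg hj, if_neg hj]
        simp
    | cons w xs'' =>
      have hx' : (w :: xs'' : List (Int × Int)) ≠ [] := by simp
      have hih := ih (z :: ys') hx' (by simp)
      simp only [List.head_cons, List.cons_append] at hih
      rcases hM : gspec (w :: (xs'' ++ z :: ys')) with _ | ⟨M1, Ms⟩
      · exact absurd hM (gspec_ne_nil w (xs'' ++ z :: ys'))
      rw [hM, hGR] at hih
      rcases hGL : gspec (w :: xs'') with _ | ⟨hL, gsL⟩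
      · exact absurd hGL (gspec_ne_nil w xs'')
      rw [hGL] at hih
      -- hih : M1 :: Ms = mergeHalves (hL :: gsL) (hR :: gsR) P z.1
      simp only [List.cons_append, List.head_cons]
      rw [gspec_cons_cons x w (xs'' ++ z :: ys') M1 Ms hM]
      rw [List.getLast_cons hx']
      rw [gspec_cons_cons x w xs'' hL gsL hGL]
      by_cases hJ1 : joins (PySem.Int.mod x.1 10) (PySem.Int.floordiv x.1 10) w.1
      · rw [if_pos hJ1, if_pos hJ1]
        have hu : (x.2 :: gfill (PySem.Int.mod x.1 10) w.1 ++ hL) =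
            (x.2 :: gfill (PySem.Int.mod x.1 10) w.1) ++ hL := by simp
        rw [hu, mergeHalves_prepend_head (x.2 :: gfill (PySem.Int.mod x.1 10) w.1) hL gsL
          (hR :: gsR) _ _ (by simp) M1 Ms hih.symm]
      · rw [if_neg hJ1, if_neg hJ1]
        rw [mergeHalves_cons_left [x.2] (hL :: gsL) (hR :: gsR) _ _ (by simp) (by simp)]
        rw [← hih]

lemma dc_eq_gspec_aux : ∀ (n : Nat) (items : List (Int × Int)), items.length ≤ n →
    dcPattern items = gspec items := by
  intro n
  induction n with
  | zero =>
    intro items h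
    have : items = [] := List.eq_nil_of_length_eq_zero (by omega)
    subst this
    rw [dcPattern.eq_def]
    rfl
  | succ n ih =>
    intro items hlen
    rcases items with _ | ⟨x, _ | ⟨y, rest⟩⟩
    · rw [dcPattern.eq_def]
      rfl
    · rw [dcPattern.eq_def]
      rfl
    · have hge : 2 ≤ (x :: y :: rest).length := by simp
      have hm : PySem.Int.floordiv (((x :: y :: rest).length : Nat) : Int) 2 =
          (((x :: y :: rest).length / 2 : Nat) : Int) := by
        exact_mod_cast PySem.Int.floordiv_natCast (x :: y :: rest).length 2
      rw [dcPattern.eq_def]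
      dsimp only
      rw [hm]
      rw [PySem.List.slice_to_natCast, PySem.List.slice_from_natCast]
      have hidx : ((((x :: y :: rest).length / 2 : Nat) : Int) - 1) =
          (((x :: y :: rest).length / 2 - 1 : Nat) : Int) := by omega
      rw [hidx, PySem.List.pyGet?_natCast, PySem.List.pyGet?_natCast]
      have h1 : (x :: y :: rest).length / 2 - 1 < (x :: y :: rest).length := by omega
      have h2 : (x :: y :: rest).length / 2 < (x :: y :: rest).length := by omega
      rw [List.getElem?_eq_getElem h1, List.getElem?_eq_getElem h2]
      dsimp only
      rw [ih ((x :: y :: rest).take ((x :: y :: rest).length / 2))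
        (by rw [List.length_take]; omega)]
      rw [ih ((x :: y :: rest).drop ((x :: y :: rest).length / 2))
        (by rw [List.length_drop]; omega)]
      have htn : (x :: y :: rest).take ((x :: y :: rest).length / 2) ≠ [] :=
        List.ne_nil_of_length_pos (by rw [List.length_take]; omega)
      have hdn : (x :: y :: rest).drop ((x :: y :: rest).length / 2) ≠ [] :=
        List.ne_nil_of_length_pos (by rw [List.length_drop]; omega)
      have hlast : ((x :: y :: rest).take ((x :: y :: rest).length / 2)).getLast htn =
          (x :: y :: rest)[(x :: y :: rest).length / 2 - 1]'h1 := by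
        have e2 : ((x :: y :: rest).take ((x :: y :: rest).length / 2)).getLast? =
            some ((x :: y :: rest)[(x :: y :: rest).length / 2 - 1]'h1) := by
          rw [List.getLast?_eq_getElem?]
          have hlt : ((x :: y :: rest).take ((x :: y :: rest).length / 2)).length - 1 =
              (x :: y :: rest).length / 2 - 1 := by
            rw [List.length_take]; omega
          rw [hlt, List.getElem?_take_of_lt (by omega), List.getElem?_eq_getElem h1]
        have e1 := List.getLast?_eq_some_getLast htn
        rw [e1] at e2
        exact Option.some.inj e2
      have hhead : ((x :: y :: rest).drop ((x :: y :: rest).length / 2)).head hdn =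
          (x :: y :: rest)[(x :: y :: rest).length / 2]'h2 := List.head_drop hdn
      rw [← hlast, ← hhead]
      rw [← gspec_append _ _ htn hdn]
      rw [List.take_append_drop]

lemma dc_eq_gspec (items : List (Int × Int)) : dcPattern items = gspec items :=
  dc_eq_gspec_aux items.length items le_rfl

-- ===== VERDICT (by name: the statement is the Claim_ definition above) =====
theorem to_pattern_spec : Claim_equal_to_pattern := by
  intro counter _
  unfold Spec_to_pattern to_pattern_alt
  rw [to_pattern_eq_gspec, dc_eq_gspec]
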